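-- pv_equiv track=rewrite | github.com/aregm/icl | src/infractl/plugins/ssh/utils.py | identify_script_position
-- ===== SOURCE A (Python) =====
-- def identify_script_position(args):
--     skip_next_arg = False
--     mpi_script_pos = -1
--
--     for idx, arg in enumerate(args):
--         if not skip_next_arg:
--             if arg.startswith('-') or arg.startswith('+'):
--                 skip_next_arg = True
--                 continue
--             mpi_script_pos = idx
--             break
--         skip_next_arg = False
--
--     if mpi_script_pos == -1:
--         raise ValueError("script not found in run command's arguments")
--
--     return mpi_script_pos
-- ===== SOURCE B (Python) =====
-- def identify_script_position(args):
--     i = 0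
--     n = len(args)
--     while i < n:
--         if args[i].startswith('-') or args[i].startswith('+'):
--             i += 2
--         else:
--             return i
--     raise ValueError("script not found in run command's arguments")
-- ===== Notes on version B (the rewrite author's own statement) =====
-- stated objective: simpler
-- what changed: Replaces the enumerate loop carrying a skip_next_arg boolean and a -1 sentinel with a direct index walk that strides by 2 over flag/value pairs and returns immediately at the first non-flag argument.
import Mathlib
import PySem

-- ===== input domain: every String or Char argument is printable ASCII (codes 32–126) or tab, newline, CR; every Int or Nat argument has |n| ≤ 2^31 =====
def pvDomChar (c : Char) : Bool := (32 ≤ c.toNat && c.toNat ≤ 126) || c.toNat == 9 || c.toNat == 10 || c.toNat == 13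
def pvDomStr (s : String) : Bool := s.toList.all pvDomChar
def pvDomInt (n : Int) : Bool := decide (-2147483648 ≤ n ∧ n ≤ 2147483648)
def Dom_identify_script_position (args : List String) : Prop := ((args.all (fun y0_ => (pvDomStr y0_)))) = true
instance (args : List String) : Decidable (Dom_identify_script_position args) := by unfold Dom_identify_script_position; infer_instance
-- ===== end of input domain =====

-- B replaces A's enumerate loop with skip_next_arg boolean by an index walk striding by 2 over flag/value pairs (objective: simpler).

-- ===== PORT A =====
-- A's for-loop over enumerate(args) carrying skip_next_arg and breaking with mpi_script_pos;
-- where Python raises ValueError (no script found) the loop leaves -1, excluded by Pre_.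
def pvLoopA : List String → Int → Bool → Int
  | [], _, _ => -1
  | a :: rest, idx, skip =>
    if !skip then
      if PySem.Str.startswith a "-" || PySem.Str.startswith a "+" then
        pvLoopA rest (idx + 1) true
      else idx
    else pvLoopA rest (idx + 1) false

def identify_script_position (args : List String) : Int :=
  pvLoopA args 0 false

-- ===== PORT B =====
-- B's while loop: stride 2 past a flag and its value, return the index of the first non-flag.
def pvWalkB : List String → Int → Int
  | [], _ => -1
  | [a], i =>
    if PySem.Str.startswith a "-" || PySem.Str.startswith a "+" then -1 else i
  | a :: _ :: rest, i =>
    if PySem.Str.startswith a "-" || PySem.Str.startswith a "+" then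
      pvWalkB rest (i + 2)
    else i

def identify_script_position_alt (args : List String) : Int :=
  pvWalkB args 0

-- ===== PRECONDITION & SPEC =====
-- Pre_ excludes exactly the inputs on which A (and B alike) raises ValueError:
-- those where every even-index argument is a flag (starts with '-' or '+').
def Pre_identify_script_position (args : List String) : Prop :=
  ∃ j : Nat, j < args.length ∧ j % 2 = 0 ∧
    ¬ (PySem.Str.startswith (args.getD j "") "-" || PySem.Str.startswith (args.getD j "") "+") = true

instance (args : List String) : Decidable (Pre_identify_script_position args) := by
  unfold Pre_identify_script_position; infer_instance

def pvWitness_identify_script_position : List String := ["-n", "4", "script.py"]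

def Spec_identify_script_position (args : List String) (out : Int) : Prop := out = identify_script_position_alt args
instance (args : List String) (out : Int) : Decidable (Spec_identify_script_position args out) := by unfold Spec_identify_script_position; infer_instance

-- ===== CLAIM (what is proved, stated in full; the proofs are below) =====
def Claim_equal_identify_script_position : Prop := ∀ (args : List String), Dom_identify_script_position args → Pre_identify_script_position args → Spec_identify_script_position args (identify_script_position args)

-- ===== LEMMAS AND PROOFS =====

-- A's loop with skip=false agrees with B's stride-2 walk, for every start index.
lemma loopA_eq_walkB (l : List String) (i : Int) : pvLoopA l i false = pvWalkB l i := by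
  fun_induction pvWalkB l i with
  | case1 => simp [pvLoopA]
  | case2 a i h => simp [Bool.or_eq_true] at h; simp [pvLoopA, h]
  | case3 a i h => simp [Bool.or_eq_true] at h; simp [pvLoopA, h.1, h.2]
  | case4 a b rest i h ih =>
      simp only [pvLoopA, Bool.or_eq_true, Bool.not_false, if_true, Bool.not_true] at h ⊢
      rw [if_pos h, if_neg (by simp), show i + 1 + 1 = i + 2 by ring]
      exact ih
  | case5 a b rest i h =>
      simp only [pvLoopA, Bool.or_eq_true, Bool.not_false, if_true] at h ⊢
      rw [if_neg h]

-- ===== VERDICT =====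
theorem identify_script_position_spec : Claim_equal_identify_script_position := by
  intro args _ _
  unfold Spec_identify_script_position identify_script_position identify_script_position_alt
  exact loopA_eq_walkB args 0
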